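-- pv_equiv track=rewrite | github.com/Daniela02092005/SmartMathPy | Fundamentos/Relaciones.py | total_order
-- ===== SOURCE A (Python) =====
-- def total_order(P: set, A: set):
--     """
--     The `total_order` function checks whether a given set of pairs satisfies the total order property. This is based on the definition:
--         A partially ordered set (A, ≤) is called a total order (or linear order or chain) if there are no elements in A that are incomparable
--         according to ≤; in other words, if every pair of elements in A is comparable according to ≤.
--     """
--
--     result = True
--
--     for a in A:
--         for b in A:
--             if (a, b) in P or (b, a) in P:
--                 continue
--             else:
--                 result = False
--                 break
--
--     return result
-- ===== SOURCE B (Python) =====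
-- def total_order(P: set, A: set):
--     """Check comparability of every pair of A under P by indexing P into
--     per-element neighbor sets, then checking each element is comparable
--     to all of A (including itself)."""
--     elems = set(A)
--     n = len(elems)
--     adj = {a: set() for a in elems}
--     for (x, y) in P:
--         if x in adj and y in adj:
--             adj[x].add(y)
--             adj[y].add(x)
--     return all(len(adj[a]) == n for a in elems)
-- ===== Notes on version B (the rewrite author's own statement) =====
-- stated objective: alternative
-- what changed: Instead of testing comparability for every ordered pair (a,b) in A x A with an early break, B makes one pass over P building a neighbor set per element and then just checks that every element's neighbor set covers all of A.
import Mathlib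
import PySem

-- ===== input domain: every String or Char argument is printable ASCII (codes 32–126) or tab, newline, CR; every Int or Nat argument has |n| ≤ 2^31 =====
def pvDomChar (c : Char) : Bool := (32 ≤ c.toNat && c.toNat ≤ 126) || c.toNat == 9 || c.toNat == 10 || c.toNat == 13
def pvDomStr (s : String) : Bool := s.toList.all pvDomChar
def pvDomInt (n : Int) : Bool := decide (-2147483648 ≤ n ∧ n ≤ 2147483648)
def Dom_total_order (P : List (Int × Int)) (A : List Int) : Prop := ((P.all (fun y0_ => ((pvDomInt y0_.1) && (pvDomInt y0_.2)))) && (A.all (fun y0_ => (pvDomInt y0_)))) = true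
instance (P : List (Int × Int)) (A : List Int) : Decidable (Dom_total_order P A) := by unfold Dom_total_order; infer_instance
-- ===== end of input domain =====

-- B replaces A's pairwise comparability scan over A x A by one pass over P building
-- per-element neighbor sets, then checks each neighbor set covers A (objective: alternative algorithm).

-- ===== PORT A =====
-- inner 'for b in A' loop with its break; result stays False once set
def total_order_inner (P : List (Int × Int)) (a : Int) : List Int → Bool → Bool
  | [], r => r
  | b :: bs, r =>
      if PySem.Set.contains P (a, b) || PySem.Set.contains P (b, a) then
        total_order_inner P a bs r
      else
        false

def total_order (P : List (Int × Int)) (A : List Int) : Bool :=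
  A.foldl (fun r a => total_order_inner P a A r) true

-- ===== PORT B =====
-- one step of the 'for (x, y) in P' loop
def total_order_step (d : PySem.Dict Int (PySem.Set Int)) (p : Int × Int) : PySem.Dict Int (PySem.Set Int) :=
  if d.contains p.1 && d.contains p.2 then
    (d.modify p.1 PySem.Set.empty (fun s => PySem.Set.add s p.2)).modify p.2 PySem.Set.empty
      (fun s => PySem.Set.add s p.1)
  else d

def total_order_alt (P : List (Int × Int)) (A : List Int) : Bool :=
  let elems := PySem.Set.ofList A
  let n := elems.length
  let adj0 : PySem.Dict Int (PySem.Set Int) :=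
    elems.foldl (fun d a => d.insert a PySem.Set.empty) PySem.Dict.empty
  let adj := P.foldl total_order_step adj0
  elems.all (fun a => (adj.getD a PySem.Set.empty).length == n)

-- ===== PRECONDITION & SPEC =====
def Spec_total_order (P : List (Int × Int)) (A : List Int) (out : Bool) : Prop := out = total_order_alt P A
instance (P : List (Int × Int)) (A : List Int) (out : Bool) : Decidable (Spec_total_order P A out) := by unfold Spec_total_order; infer_instance

-- ===== CLAIM (what is proved, stated in full; the proofs are below) =====
def Claim_equal_total_order : Prop := ∀ (P : List (Int × Int)) (A : List Int), Dom_total_order P A → Spec_total_order P A (total_order P A)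

-- ===== LEMMAS AND PROOFS =====

def pvCmp (P : List (Int × Int)) (a b : Int) : Bool :=
  PySem.Set.contains P (a, b) || PySem.Set.contains P (b, a)

theorem inner_eq (P : List (Int × Int)) (a : Int) (bs : List Int) (r : Bool) :
    total_order_inner P a bs r = (r && bs.all (fun b => pvCmp P a b)) := by
  induction bs generalizing r with
  | nil => simp [total_order_inner]
  | cons b bs ih =>
      have hc : (PySem.Set.contains P (a, b) || PySem.Set.contains P (b, a)) = pvCmp P a b := rfl
      simp only [total_order_inner]
      rw [hc]
      cases hcv : pvCmp P a b <;> simp [hcv, ih]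

theorem total_order_true_iff (P : List (Int × Int)) (A : List Int) :
    total_order P A = true ↔ ∀ a ∈ A, ∀ b ∈ A, pvCmp P a b = true := by
  unfold total_order
  have h : ∀ (M : List Int) (r : Bool),
      M.foldl (fun r a => total_order_inner P a A r) r
        = (r && M.all (fun a => A.all (fun b => pvCmp P a b))) := by
    intro M
    induction M with
    | nil => intro r; simp
    | cons a M ih =>
        intro r
        simp only [List.foldl_cons, List.all_cons]
        rw [ih, inner_eq, Bool.and_assoc]
  rw [h]
  simp [List.all_eq_true]

-- invariant of B's dict after processing the pairs in Q
def pvGoodDict (A : List Int) (Q : List (Int × Int)) (d : PySem.Dict Int (PySem.Set Int)) : Prop :=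
  (∀ x : Int, d.contains x = decide (x ∈ PySem.Set.ofList A)) ∧
  (∀ a ∈ PySem.Set.ofList A,
      (d.getD a PySem.Set.empty).Nodup ∧
      ∀ b : Int, b ∈ d.getD a PySem.Set.empty ↔
        (b ∈ PySem.Set.ofList A ∧ ((a, b) ∈ Q ∨ (b, a) ∈ Q)))

theorem init_contains (L : List Int) :
    ∀ (d : PySem.Dict Int (PySem.Set Int)) (x : Int),
      (L.foldl (fun d a => d.insert a PySem.Set.empty) d).contains x = (decide (x ∈ L) || d.contains x) := by
  induction L with
  | nil => intro d x; simp
  | cons a L ih =>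
      intro d x
      simp only [List.foldl_cons, ih, PySem.Dict.contains_insert, List.mem_cons]
      by_cases h : x = a
      · simp [h]
      · simp [h, beq_eq_false_iff_ne.mpr h]

theorem init_getD (L : List Int) :
    ∀ (d : PySem.Dict Int (PySem.Set Int)) (x : Int),
      (L.foldl (fun d a => d.insert a PySem.Set.empty) d).getD x PySem.Set.empty
        = if x ∈ L then PySem.Set.empty else d.getD x PySem.Set.empty := by
  induction L with
  | nil => intro d x; simp
  | cons a L ih =>
      intro d x
      simp only [List.foldl_cons, ih, PySem.Dict.getD_insert, List.mem_cons]
      by_cases h1 : x ∈ L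
      · simp [h1]
      · by_cases h2 : x = a <;> simp [h1, h2]

theorem good_init (A : List Int) :
    pvGoodDict A []
      ((PySem.Set.ofList A).foldl (fun d a => d.insert a PySem.Set.empty) PySem.Dict.empty) := by
  constructor
  · intro x
    rw [init_contains]
    simp
  · intro a ha
    rw [init_getD]
    simp [ha, PySem.Set.empty]

theorem good_step (A : List Int) (Q : List (Int × Int)) (d : PySem.Dict Int (PySem.Set Int))
    (p : Int × Int) (h : pvGoodDict A Q d) : pvGoodDict A (Q ++ [p]) (total_order_step d p) := by
  obtain ⟨p1, p2⟩ := p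
  obtain ⟨hc, hg⟩ := h
  simp only [total_order_step]
  by_cases hcond : (d.contains p1 && d.contains p2) = true
  · have hp1 : p1 ∈ PySem.Set.ofList A := by
      have h' := hc p1
      rw [Bool.and_eq_true] at hcond
      rw [hcond.1] at h'
      exact of_decide_eq_true h'.symm
    have hp2 : p2 ∈ PySem.Set.ofList A := by
      have h' := hc p2
      rw [Bool.and_eq_true] at hcond
      rw [hcond.2] at h'
      exact of_decide_eq_true h'.symm
    rw [if_pos hcond]
    constructor
    · intro x
      simp only [PySem.Dict.contains_modify, hc]
      by_cases h2 : x = p2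
      · subst h2; simp [hp2]
      · by_cases h1 : x = p1
        · subst h1; simp [hp1]
        · simp [beq_eq_false_iff_ne.mpr h1, beq_eq_false_iff_ne.mpr h2]
    · intro a ha
      have hRHS : ∀ b : Int,
          (b ∈ PySem.Set.ofList A ∧ ((a, b) ∈ Q ++ [(p1, p2)] ∨ (b, a) ∈ Q ++ [(p1, p2)]))
            ↔ (b ∈ d.getD a PySem.Set.empty ∨ (a = p1 ∧ b = p2) ∨ (a = p2 ∧ b = p1)) := by
        intro b
        rw [(hg a ha).2 b]
        simp only [List.mem_append, List.mem_singleton, Prod.mk.injEq]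
        constructor
        · rintro ⟨hb, (hq | hq) | (hq | hq)⟩
          · exact Or.inl ⟨hb, Or.inl hq⟩
          · exact Or.inr (Or.inl hq)
          · exact Or.inl ⟨hb, Or.inr hq⟩
          · exact Or.inr (Or.inr ⟨hq.2, hq.1⟩)
        · rintro (⟨hb, hq⟩ | ⟨ha1, hb2⟩ | ⟨ha2, hb1⟩)
          · exact ⟨hb, hq.imp Or.inl Or.inl⟩
          · exact ⟨by rw [hb2]; exact hp2, Or.inl (Or.inr ⟨ha1, hb2⟩)⟩
          · exact ⟨by rw [hb1]; exact hp1, Or.inr (Or.inr ⟨hb1, ha2⟩)⟩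
      simp only [PySem.Dict.getD_modify]
      by_cases h1 : a = p1
      · subst h1
        by_cases h2 : a = p2
        · subst h2
          rw [if_pos rfl, if_pos rfl]
          refine ⟨PySem.Set.nodup_add _ _ (PySem.Set.nodup_add _ _ (hg a ha).1), fun b => Iff.trans ?_ (hRHS b).symm⟩
          simp only [PySem.Set.mem_add]
          tauto
        · rw [if_neg h2, if_pos rfl]
          refine ⟨PySem.Set.nodup_add _ _ (hg a ha).1, fun b => Iff.trans ?_ (hRHS b).symm⟩
          simp only [PySem.Set.mem_add]
          tauto
      · by_cases h2 : a = p2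
        · subst h2
          rw [if_pos rfl, if_neg h1]
          refine ⟨PySem.Set.nodup_add _ _ (hg a ha).1, fun b => Iff.trans ?_ (hRHS b).symm⟩
          simp only [PySem.Set.mem_add]
          tauto
        · rw [if_neg h2, if_neg h1]
          refine ⟨(hg a ha).1, fun b => Iff.trans ?_ (hRHS b).symm⟩
          tauto
  · rw [if_neg hcond]
    have hout : ¬ (p1 ∈ PySem.Set.ofList A ∧ p2 ∈ PySem.Set.ofList A) := by
      intro hmem
      exact hcond (by rw [hc p1, hc p2]; simp [hmem.1, hmem.2])
    refine ⟨hc, fun a ha => ⟨(hg a ha).1, fun b => ?_⟩⟩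
    rw [(hg a ha).2 b]
    simp only [List.mem_append, List.mem_singleton, Prod.mk.injEq]
    constructor
    · rintro ⟨hb, hq⟩; exact ⟨hb, hq.imp Or.inl Or.inl⟩
    · rintro ⟨hb, (hq | hq) | (hq | hq)⟩
      · exact ⟨hb, Or.inl hq⟩
      · exact absurd ⟨by rw [← hq.1]; exact ha, by rw [← hq.2]; exact hb⟩ hout
      · exact ⟨hb, Or.inr hq⟩
      · exact absurd ⟨by rw [← hq.1]; exact hb, by rw [← hq.2]; exact ha⟩ hout

theorem good_fold (A : List Int) (P : List (Int × Int)) :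
    ∀ (Q : List (Int × Int)) (d : PySem.Dict Int (PySem.Set Int)),
      pvGoodDict A Q d → pvGoodDict A (Q ++ P) (P.foldl total_order_step d) := by
  induction P with
  | nil => intro Q d h; simpa using h
  | cons p P ih =>
      intro Q d h
      have := ih (Q ++ [p]) (total_order_step d p) (good_step A Q d p h)
      simpa using this

theorem alt_true_iff (P : List (Int × Int)) (A : List Int) :
    total_order_alt P A = true ↔
      ∀ a ∈ PySem.Set.ofList A, ∀ b ∈ PySem.Set.ofList A, ((a, b) ∈ P ∨ (b, a) ∈ P) := by
  have hgood := good_fold A P []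
    ((PySem.Set.ofList A).foldl (fun d a => d.insert a PySem.Set.empty) PySem.Dict.empty)
    (good_init A)
  rw [List.nil_append] at hgood
  obtain ⟨-, hg⟩ := hgood
  set adj := P.foldl total_order_step
    ((PySem.Set.ofList A).foldl (fun d a => d.insert a PySem.Set.empty) PySem.Dict.empty) with hadj
  rw [show total_order_alt P A
      = (PySem.Set.ofList A).all
          (fun a => ((adj.getD a PySem.Set.empty).length == (PySem.Set.ofList A).length)) from rfl]
  simp only [List.all_eq_true]
  constructor
  · intro h a ha b hb
    have hS := hg a ha
    have hlen := h a ha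
    rw [beq_iff_eq] at hlen
    have hsub : ∀ x, x ∈ adj.getD a PySem.Set.empty → x ∈ PySem.Set.ofList A :=
      fun x hx => ((hS.2 x).mp hx).1
    have hbmem : b ∈ adj.getD a PySem.Set.empty := by
      have hnd := hS.1
      have hndA : (PySem.Set.ofList A).Nodup := PySem.Set.nodup_ofList A
      have hfs : (adj.getD a PySem.Set.empty).toFinset = (PySem.Set.ofList A).toFinset := by
        apply Finset.eq_of_subset_of_card_le
        · intro x hx
          rw [List.mem_toFinset] at hx ⊢
          exact hsub x hx
        · rw [List.toFinset_card_of_nodup hnd, List.toFinset_card_of_nodup hndA, hlen]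
      rw [← List.mem_toFinset, hfs, List.mem_toFinset]
      exact hb
    exact ((hS.2 b).mp hbmem).2
  · intro h a ha
    have hS := hg a ha
    rw [beq_iff_eq]
    have hperm : List.Perm (adj.getD a PySem.Set.empty) (PySem.Set.ofList A) := by
      rw [List.perm_ext_iff_of_nodup hS.1 (PySem.Set.nodup_ofList A)]
      intro b
      rw [hS.2 b]
      constructor
      · exact fun hb => hb.1
      · exact fun hb => ⟨hb, h a ha b hb⟩
    exact hperm.length_eq

-- ===== VERDICT (by name: the statement is the Claim_ definition above) =====
theorem total_order_spec : Claim_equal_total_order := by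
  intro P A _
  unfold Spec_total_order
  rw [Bool.eq_iff_iff, total_order_true_iff, alt_true_iff]
  constructor
  · intro h a ha b hb
    have := h a (by rwa [PySem.Set.mem_ofList] at ha) b (by rwa [PySem.Set.mem_ofList] at hb)
    unfold pvCmp at this
    rw [Bool.or_eq_true, PySem.Set.contains_iff, PySem.Set.contains_iff] at this
    exact this
  · intro h a ha b hb
    unfold pvCmp
    rw [Bool.or_eq_true, PySem.Set.contains_iff, PySem.Set.contains_iff]
    exact h a (by rwa [PySem.Set.mem_ofList]) b (by rwa [PySem.Set.mem_ofList])
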